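-- pv_equiv track=rewrite | github.com/szufix/mapel | mapel/elections/cultures/guardians_plus.py | build_perms
-- ===== SOURCE A (Python) =====
-- def build_perms(matrix):
--     if len(matrix[0]) == 0:
--         return [[]]
--     perms = []
--     last_col = []
--     for j in range(len(matrix)):
--         last_col.append(matrix[j].pop())
--     if sum(last_col) > 0:
--         for last_cand, elig in enumerate(last_col):
--             if elig <= 0:
--                 continue
--             zeroed_vector = matrix[last_cand][:]
--             matrix[last_cand][:] = len(matrix[last_cand]) * [0]
--             for perm in build_perms(matrix):
--                 perms.append(perm + [last_cand])
--             matrix[last_cand][:] = zeroed_vector[:]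
--     for j in range(len(matrix)):
--         matrix[j].append(last_col[j])
--     return perms
-- ===== SOURCE B (Python) =====
-- def build_perms(matrix):
--     # Non-mutating re-implementation: recurse over an explicit column index with a
--     # `used` set of already-placed candidates instead of popping columns / zeroing rows.
--     # (A temporarily mutates `matrix` but restores it before returning; B never mutates.)
--     n = len(matrix)
--     m = len(matrix[0])
--     used = [False] * n
--
--     def go(c):
--         if c < 0:
--             return [[]]
--         if sum(matrix[j][c] for j in range(n) if not used[j]) <= 0:
--             return []
--         perms = []
--         for cand in range(n):
--             if used[cand] or matrix[cand][c] <= 0: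
--                 continue
--             used[cand] = True
--             for p in go(c - 1):
--                 perms.append(p + [cand])
--             used[cand] = False
--         return perms
--
--     return go(m - 1)
-- ===== Notes on version B (the rewrite author's own statement) =====
-- stated objective: alternative
-- what changed: Replaces A's mutate-and-restore scheme (popping the last column and zeroing/restoring candidate rows on a shared matrix) by a pure recursion over an explicit column index with a `used` boolean list; the unused-candidate column sum reproduces A's prune exactly.
-- outside the precondition, e.g. on build_perms([[1], [-1, 2]]): A returns [[0], [1]], B returns []
import Mathlib
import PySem

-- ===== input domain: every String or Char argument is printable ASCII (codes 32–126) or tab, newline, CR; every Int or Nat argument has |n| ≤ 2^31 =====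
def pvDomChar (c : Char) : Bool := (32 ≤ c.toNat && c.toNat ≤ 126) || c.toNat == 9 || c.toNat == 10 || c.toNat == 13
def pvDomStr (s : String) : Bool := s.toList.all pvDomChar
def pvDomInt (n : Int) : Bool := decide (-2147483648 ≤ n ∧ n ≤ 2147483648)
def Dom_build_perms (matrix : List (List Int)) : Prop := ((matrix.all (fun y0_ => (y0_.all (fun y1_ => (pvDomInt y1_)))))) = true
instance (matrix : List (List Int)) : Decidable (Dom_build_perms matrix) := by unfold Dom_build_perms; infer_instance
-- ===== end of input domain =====

-- B re-implements A without mutation: explicit column-index recursion with a `used` list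
-- instead of A's pop-column / zero-row / restore scheme (A temporarily mutates `matrix` but
-- restores it before returning, so only the return value is observable).  Objective: alternative.

-- ===== PORT A =====
-- matrix[last_cand][:] = len(matrix[last_cand]) * [0]
def pvZeroRow (m : List (List Int)) (i : Nat) : List (List Int) :=
  m.set i (List.replicate ((m.getD i []).length) 0)

-- A recurses on the mutated matrix; `fuel` (= first-row length at the top call) only makes the
-- recursion structural — it is never exhausted on inputs satisfying Pre_.
-- `p.1.toNat` is exact: enumerate indices are nonnegative.
def build_perms_go : Nat → List (List Int) → List (List Int)
  | _, [] => []                    -- Python: matrix[0] raises IndexError here (outside Pre_)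
  | fuel, r0 :: rest =>
    if r0.length = 0 then [[]]
    else
      match fuel with
      | 0 => []
      | fuel' + 1 =>
        let matrix := r0 :: rest
        let last_col := matrix.map (fun r => r.getLast?.getD 0)   -- r.pop(); rows nonempty under Pre_
        let matrix' := matrix.map (fun r => r.dropLast)
        if last_col.sum > 0 then
          (PySem.List.enumerate last_col).foldl (fun perms p =>
            if p.2 ≤ 0 then perms
            else perms ++ (build_perms_go fuel' (pvZeroRow matrix' p.1.toNat)).map
                            (fun perm => perm ++ [p.1])) []
        else []

def build_perms (matrix : List (List Int)) : List (List Int) :=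
  build_perms_go ((matrix.headD []).length) matrix

-- ===== PORT B =====
-- sum(matrix[j][c] for j in range(n) if not used[j])
def pvColSum (matrix : List (List Int)) (n : Nat) (used : List Bool) (c : Nat) : Int :=
  ((List.range n).filter (fun j => ! used.getD j false)).foldl
    (fun s j => s + ((matrix.getD j []).getD c 0)) 0

-- go(c) with c = k - 1 (k = 0 is Python's `c < 0` base case)
def build_perms_alt_go (matrix : List (List Int)) (n : Nat) : Nat → List Bool → List (List Int)
  | 0, _ => [[]]
  | k + 1, used =>
    if pvColSum matrix n used k ≤ 0 then []
    else
      (List.range n).foldl (fun perms cand =>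
        if used.getD cand false || ((matrix.getD cand []).getD k 0) ≤ 0 then perms
        else perms ++ (build_perms_alt_go matrix n k (used.set cand true)).map
                        (fun p => p ++ [(cand : Int)])) []

def build_perms_alt (matrix : List (List Int)) : List (List Int) :=
  build_perms_alt_go matrix matrix.length ((matrix.headD []).length)
    (List.replicate matrix.length false)

-- ===== PRECONDITION & SPEC =====
-- Pre_ excludes the empty matrix (A raises IndexError on matrix[0]) and ragged matrices whose
-- first row is nonempty: on those A's per-row pops generally raise IndexError, and where such a
-- ragged input happens to return, extra entries of longer rows are handled by accident of the
-- mutation scheme.  (A ragged matrix whose first row is empty is admitted: both return [[]].)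
def Pre_build_perms (matrix : List (List Int)) : Prop :=
  matrix ≠ [] ∧
    ((matrix.headD []).length = 0 ∨ ∀ r ∈ matrix, r.length = (matrix.headD []).length)
instance (matrix : List (List Int)) : Decidable (Pre_build_perms matrix) := by
  unfold Pre_build_perms; infer_instance

def pvWitness_build_perms : List (List Int) := [[1, 0], [0, 1]]

def Spec_build_perms (matrix : List (List Int)) (out : List (List Int)) : Prop := out = build_perms_alt matrix
instance (matrix : List (List Int)) (out : List (List Int)) : Decidable (Spec_build_perms matrix out) := by unfold Spec_build_perms; infer_instance

-- ===== CLAIM (what is proved, stated in full; the proofs are below) =====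
def Claim_equal_build_perms : Prop := ∀ (matrix : List (List Int)), Dom_build_perms matrix → Pre_build_perms matrix → Spec_build_perms matrix (build_perms matrix)

-- ===== LEMMAS AND PROOFS =====

-- The state of A's matrix during its recursion: candidates marked in `u` have their row
-- zeroed, the others keep the first k columns of their original row.
def pvRow (M : List (List Int)) (u : List Bool) (k : Nat) (j : Nat) : List Int :=
  if u.getD j false then List.replicate k (0 : Int) else (M.getD j []).take k

def pvTrans (M : List (List Int)) (u : List Bool) (k : Nat) : List (List Int) :=
  (List.range M.length).map (pvRow M u k)

theorem pvTrans_zero (M : List (List Int)) (u : List Bool) :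
    pvTrans M u 0 = List.replicate M.length [] := by
  have h : ∀ j, pvRow M u 0 j = [] := by intro j; unfold pvRow; split <;> simp
  unfold pvTrans
  rw [List.map_congr_left (fun j _ => h j)]
  simp [List.map_const']

theorem pvRow_length {M : List (List Int)} {m : Nat}
    (hrect : ∀ r ∈ M, r.length = m) (u : List Bool) {k : Nat} (hk : k ≤ m)
    {j : Nat} (hj : j < M.length) : (pvRow M u k j).length = k := by
  have hmem : M.getD j [] ∈ M := by
    rw [List.getD_eq_getElem _ _ hj]; exact List.getElem_mem hj
  unfold pvRow; split
  · simp
  · rw [List.length_take, hrect _ hmem]; omega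

theorem pvTrans_dropLast {M : List (List Int)} {m : Nat}
    (hrect : ∀ r ∈ M, r.length = m) (u : List Bool) {k : Nat} (hk : k + 1 ≤ m) :
    (pvTrans M u (k + 1)).map (fun r => r.dropLast) = pvTrans M u k := by
  unfold pvTrans
  rw [List.map_map]
  apply List.map_congr_left
  intro j hj
  rw [List.mem_range] at hj
  have hmem : M.getD j [] ∈ M := by
    rw [List.getD_eq_getElem _ _ hj]; exact List.getElem_mem hj
  simp only [Function.comp, pvRow]
  split
  · simp [List.dropLast_eq_take]
  · rw [List.dropLast_eq_take, List.length_take, List.take_take]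
    congr 1
    have := hrect _ hmem
    omega

theorem pvRow_last {M : List (List Int)} {m : Nat}
    (hrect : ∀ r ∈ M, r.length = m) (u : List Bool) {k : Nat} (hk : k + 1 ≤ m)
    {j : Nat} (hj : j < M.length) :
    (pvRow M u (k + 1) j).getLast?.getD 0
      = if u.getD j false then 0 else (M.getD j []).getD k 0 := by
  have hmem : M.getD j [] ∈ M := by
    rw [List.getD_eq_getElem _ _ hj]; exact List.getElem_mem hj
  have hr := hrect _ hmem
  unfold pvRow
  split
  · simp [List.getLast?_eq_getElem?]
  · rw [List.getLast?_eq_getElem?, List.length_take, List.getElem?_take]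
    have h1 : min (k+1) (M.getD j []).length - 1 = k := by omega
    have h2 : min (k+1) (M.getD j []).length - 1 < k + 1 := by omega
    rw [if_pos h2, h1]
    simp [List.getD]

theorem pvZeroRow_trans {M : List (List Int)} {m : Nat}
    (hrect : ∀ r ∈ M, r.length = m) {u : List Bool} (hu : u.length = M.length)
    {k : Nat} (hk : k ≤ m) {j : Nat} (hj : j < M.length) :
    pvZeroRow (pvTrans M u k) j = pvTrans M (u.set j true) k := by
  have hlen : (pvTrans M u k).length = M.length := by simp [pvTrans]
  have hjT : j < (pvTrans M u k).length := by rw [hlen]; exact hj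
  have hjU : j < u.length := by omega
  have hrow : (pvTrans M u k).getD j [] = pvRow M u k j := by
    rw [List.getD_eq_getElem _ _ hjT]; simp [pvTrans]
  apply List.ext_getElem
  · simp [pvZeroRow, pvTrans]
  · intro i hi hi'
    simp only [pvZeroRow, List.getElem_set, hrow, pvRow_length hrect u hk hj]
    simp only [pvTrans, List.getElem_map, List.getElem_range]
    by_cases hij : j = i
    · subst hij
      rw [if_pos rfl]
      unfold pvRow
      rw [List.getD_eq_getElem _ _ (show j < (u.set j true).length by simpa using hjU),
        List.getElem_set_self (by simpa using hjU)]
      simp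
    · rw [if_neg hij]
      unfold pvRow
      congr 2
      rcases Nat.lt_or_ge i u.length with h | h
      · rw [List.getD_eq_getElem _ _ h, List.getD_eq_getElem _ _ (by simpa using h),
          List.getElem_set_ne hij]
      · rw [List.getD_eq_default _ _ h, List.getD_eq_default _ _ (by simpa using h)]

theorem sum_ite_filter (l : List Nat) (p : Nat → Bool) (f : Nat → Int) :
    (l.map (fun j => if p j then (0 : Int) else f j)).sum
      = ((l.filter (fun j => ! p j)).map f).sum := by
  induction l with
  | nil => rfl
  | cons x xs ih =>
    by_cases h : p x <;> simp [h, ih]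

theorem enum_map {α β : Type} (l : List α) (g : α → β) (s : Int) :
    PySem.List.enumerate (l.map g) s
      = (PySem.List.enumerate l s).map (fun p => (p.1, g p.2)) := by
  induction l generalizing s with
  | nil => rfl
  | cons x xs ih => simp [PySem.List.enumerate_cons, ih]

theorem enum_range' (s n : Nat) :
    PySem.List.enumerate (List.range' s n) (s : Int)
      = (List.range' s n).map (fun (j : Nat) => ((j : Int), j)) := by
  induction n generalizing s with
  | zero => rfl
  | succ n ih =>
    rw [List.range'_succ, PySem.List.enumerate_cons, List.map_cons]
    have h : ((s : Int) + 1) = ((s + 1 : Nat) : Int) := by push_cast; ring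
    rw [h, ih]

theorem pvColSum_eq {M : List (List Int)} (n : Nat) (u : List Bool) (k : Nat) :
    pvColSum M n u k
      = ((List.range n).map
          (fun j => if u.getD j false then (0 : Int) else (M.getD j []).getD k 0)).sum := by
  unfold pvColSum
  rw [PySem.List.foldl_add, sum_ite_filter]
  simp

theorem go_eq (fuel' : Nat) (mat : List (List Int)) (hne : mat ≠ [])
    (hhead : (mat.headD []).length ≠ 0) :
    build_perms_go (fuel' + 1) mat =
      (if (mat.map (fun r => r.getLast?.getD 0)).sum > 0 then
        (PySem.List.enumerate (mat.map (fun r => r.getLast?.getD 0))).foldl (fun perms p =>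
          if p.2 ≤ 0 then perms
          else perms ++ (build_perms_go fuel' (pvZeroRow ((mat.map (fun r => r.dropLast))) p.1.toNat)).map
                          (fun perm => perm ++ [p.1])) []
      else []) := by
  obtain ⟨r, rs, rfl⟩ := List.exists_cons_of_ne_nil hne
  simp only [List.headD_cons] at hhead
  simp only [build_perms_go, if_neg hhead]

theorem main_invariant {M : List (List Int)} {m : Nat}
    (hM : M ≠ []) (hrect : ∀ r ∈ M, r.length = m) :
    ∀ (k : Nat), k ≤ m → ∀ (fuel : Nat), k ≤ fuel → ∀ (u : List Bool), u.length = M.length →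
      build_perms_go fuel (pvTrans M u k) = build_perms_alt_go M M.length k u := by
  intro k
  induction k with
  | zero =>
    intro _ fuel _ u _
    rw [pvTrans_zero]
    obtain ⟨r, rs, rfl⟩ := List.exists_cons_of_ne_nil hM
    simp only [List.length_cons, List.replicate_succ]
    rw [build_perms_go.eq_def, build_perms_alt_go]
    simp
  | succ k ih =>
    intro hk fuel hfuel u hu
    match fuel with
    | 0 => omega
    | fuel' + 1 =>
      have hn : 0 < M.length := List.length_pos_of_ne_nil hM
      have hTne : pvTrans M u (k+1) ≠ [] := by
        simp [pvTrans, List.range_eq_nil]; omega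
      have hThead : ((pvTrans M u (k+1)).headD []).length ≠ 0 := by
        have h : (pvTrans M u (k+1)).headD [] = pvRow M u (k+1) 0 := by
          obtain ⟨r, rs, rfl⟩ := List.exists_cons_of_ne_nil hM
          simp [pvTrans, List.range_succ_eq_map]
        rw [h, pvRow_length hrect u hk hn]
        omega
      rw [go_eq fuel' _ hTne hThead]
      have hcol : (pvTrans M u (k+1)).map (fun r => r.getLast?.getD 0)
          = (List.range M.length).map
              (fun j => if u.getD j false then (0:Int) else (M.getD j []).getD k 0) := by
        unfold pvTrans
        rw [List.map_map]
        apply List.map_congr_left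
        intro j hj
        exact pvRow_last hrect u hk (List.mem_range.mp hj)
      rw [hcol, pvTrans_dropLast hrect u hk, ← pvColSum_eq,
        build_perms_alt_go]
      by_cases hsum : pvColSum M M.length u k ≤ 0
      · rw [if_neg (by omega), if_pos hsum]
      · rw [if_pos (by omega), if_neg hsum]
        have henum := enum_range' 0 M.length
        norm_num at henum
        rw [enum_map, List.range_eq_range', henum]
        rw [← List.range_eq_range', List.foldl_map, List.foldl_map]
        apply PySem.List.foldl_congr_mem
        intro acc j hj
        have hjn : j < M.length := List.mem_range.mp hj
        have hzr := pvZeroRow_trans hrect hu (by omega : k ≤ m) hjn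
        have hih := ih (by omega) fuel' (by omega) (u.set j true) (by simpa using hu)
        simp only [Int.toNat_natCast, hzr, hih]
        by_cases huj : u.getD j false
        · simp only [List.getD_eq_getElem?_getD] at huj
          simp [huj]
        · simp only [Bool.not_eq_true, List.getD_eq_getElem?_getD] at huj
          simp [huj]

theorem pvTrans_full {M : List (List Int)} {m : Nat}
    (hrect : ∀ r ∈ M, r.length = m) :
    pvTrans M (List.replicate M.length false) m = M := by
  apply List.ext_getElem
  · simp [pvTrans]
  · intro i hi hi'
    simp only [pvTrans, List.getElem_map, List.getElem_range]
    unfold pvRow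
    rw [List.getD_eq_getElem _ _ (by simpa using hi'), List.getElem_replicate]
    simp only [if_neg (by simp : ¬ false = true)]
    rw [List.getD_eq_getElem _ _ hi']
    exact List.take_of_length_le (by rw [hrect _ (List.getElem_mem hi')])

-- ===== VERDICT (by name: the statement is the Claim_ definition above) =====
theorem build_perms_spec : Claim_equal_build_perms := by
  intro M _ hpre
  obtain ⟨hM, hpre⟩ := hpre
  rcases hpre with h0 | hrect
  · obtain ⟨r, rs, rfl⟩ := List.exists_cons_of_ne_nil hM
    simp only [List.headD_cons] at h0
    unfold Spec_build_perms build_perms build_perms_alt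
    simp [h0, build_perms_go, build_perms_alt_go]
  unfold Spec_build_perms build_perms build_perms_alt
  have h := main_invariant hM hrect ((M.headD []).length) le_rfl ((M.headD []).length) le_rfl
    (List.replicate M.length false) (by simp)
  nth_rewrite 2 [← pvTrans_full hrect]
  exact h
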